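-- pv_equiv track=rewrite | github.com/mayosupport/Advent-Of-Code | 2024/day2/pt2.py | count_valid_rows
-- ===== SOURCE A (Python) =====
-- def is_valid_row(row):
--     # Check if the row is increasing or decreasing and if all adjacent differences are between 1 and 3
--     increasing = None
--
--     for i in range(1, len(row)):
--         diff = abs(row[i] - row[i - 1])
--
--         # Check if the difference is between 1 and 3
--         if diff < 1 or diff > 3:
--             return False
--
--         # Determine if the row is increasing or decreasing
--         if row[i] > row[i - 1]:
--             if increasing is None:
--                 increasing = True
--             elif increasing is False:
--                 return False  # Bad direction
--         elif row[i] < row[i - 1]: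
--             if increasing is None:
--                 increasing = False
--             elif increasing is True:
--                 return False  # Bad direction
--
--     # If we reach here, it means the row satisfies all conditions
--     return True
--
-- def can_be_fixed_by_removal(row):
--     # Try removing each element and check if the modified row is valid
--     for i in range(len(row)):
--         modified_row = row[:i] + row[i+1:]
--         if is_valid_row(modified_row):
--             return True
--     return False
--
-- def count_valid_rows(rows):
--     count = 0
--     for row in rows:
--         # First check if the row is valid without any removal
--         if is_valid_row(row):
--             count += 1
--         # If not valid, check if it can be fixed by removing one element
--         elif can_be_fixed_by_removal(row):
--             count += 1
--     return count
-- ===== SOURCE B (Python) =====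
-- def good(a, b, s):
--     d = s * (b - a)
--     return 1 <= d <= 3
--
-- def first_bad(row, s):
--     # index of the first adjacent pair violating the step rule for direction s, else None
--     for i in range(len(row) - 1):
--         if not good(row[i], row[i + 1], s):
--             return i
--     return None
--
-- def drop(row, i):
--     return row[:i] + row[i + 1:]
--
-- def ok_dir(row, s):
--     # dampened check for one direction: only removing an endpoint of the first
--     # bad pair can possibly repair the row
--     p = first_bad(row, s)
--     if p is None:
--         return True
--     return first_bad(drop(row, p), s) is None or first_bad(drop(row, p + 1), s) is None
--
-- def count_valid_rows(rows):
--     return sum(1 for row in rows if ok_dir(row, 1) or ok_dir(row, -1))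
-- ===== Notes on version B (the rewrite author's own statement) =====
-- stated objective: faster
-- what changed: Instead of A's stateful direction-flag validity check plus trying all n one-element removals, B scans each row once per direction for the first violating adjacent pair and tests only the two removals at that pair's endpoints, since any other removal leaves the bad pair adjacent.
import Mathlib
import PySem

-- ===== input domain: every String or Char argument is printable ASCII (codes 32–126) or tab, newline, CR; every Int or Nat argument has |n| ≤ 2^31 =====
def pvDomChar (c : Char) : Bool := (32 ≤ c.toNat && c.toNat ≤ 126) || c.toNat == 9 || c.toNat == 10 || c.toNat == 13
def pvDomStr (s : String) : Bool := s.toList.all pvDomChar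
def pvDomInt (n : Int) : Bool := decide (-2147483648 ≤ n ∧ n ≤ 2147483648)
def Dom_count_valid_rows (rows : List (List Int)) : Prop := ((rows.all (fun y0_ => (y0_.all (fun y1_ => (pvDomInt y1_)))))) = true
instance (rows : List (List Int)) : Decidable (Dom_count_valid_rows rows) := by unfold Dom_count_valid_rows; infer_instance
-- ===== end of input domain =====

-- B replaces A's try-every-removal scan by checking only the two endpoints of the
-- first violating pair per direction (O(n) per row instead of O(n^2)); objective: faster.

-- ===== PORT A =====
-- loop 'for i in range(1, len(row))' with the 'increasing' flag, as structural
-- recursion over (previous element, remaining elements, flag); early returns = false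
def validAux (prev : Int) (rest : List Int) (increasing : Option Bool) : Bool :=
  match rest with
  | [] => true
  | x :: xs =>
    let diff := |x - prev|
    if diff < 1 ∨ diff > 3 then false
    else if x > prev then
      match increasing with
      | none => validAux x xs (some true)
      | some false => false
      | some true => validAux x xs (some true)
    else if x < prev then
      match increasing with
      | none => validAux x xs (some false)
      | some true => false
      | some false => validAux x xs (some false)
    else validAux x xs increasing

def is_valid_row (row : List Int) : Bool :=
  match row with
  | [] => true
  | x :: xs => validAux x xs none

-- row[:i] + row[i+1:] for 0 ≤ i < len(row) is exactly take i ++ drop (i+1)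
def can_be_fixed_by_removal (row : List Int) : Bool :=
  (List.range row.length).any (fun i => is_valid_row (row.take i ++ row.drop (i + 1)))

def count_valid_rows (rows : List (List Int)) : Int :=
  rows.foldl (fun count row =>
    if is_valid_row row then count + 1
    else if can_be_fixed_by_removal row then count + 1
    else count) 0

-- ===== PORT B =====
def goodB (a b s : Int) : Bool := decide (1 ≤ s * (b - a) ∧ s * (b - a) ≤ 3)

-- first_bad: the 'for i in range(len(row)-1)' pair scan as structural recursion
def firstBad (row : List Int) (s : Int) : Option Nat :=
  match row with
  | a :: b :: t => if goodB a b s then (firstBad (b :: t) s).map (· + 1) else some 0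
  | _ => none

-- drop: row[:i] + row[i+1:] (i a nonnegative in-range index) = take i ++ drop (i+1)
def dropB (row : List Int) (i : Nat) : List Int := row.take i ++ row.drop (i + 1)

def okDir (row : List Int) (s : Int) : Bool :=
  match firstBad row s with
  | none => true
  | some p => (firstBad (dropB row p) s).isNone || (firstBad (dropB row (p + 1)) s).isNone

-- sum(1 for row in rows if …) = countP
def count_valid_rows_alt (rows : List (List Int)) : Int :=
  (rows.countP (fun row => okDir row 1 || okDir row (-1)) : Int)

-- ===== PRECONDITION & SPEC =====
def Spec_count_valid_rows (rows : List (List Int)) (out : Int) : Prop := out = count_valid_rows_alt rows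
instance (rows : List (List Int)) (out : Int) : Decidable (Spec_count_valid_rows rows out) := by unfold Spec_count_valid_rows; infer_instance

-- ===== CLAIM (what is proved, stated in full; the proofs are below) =====
def Claim_equal_count_valid_rows : Prop := ∀ (rows : List (List Int)), Dom_count_valid_rows rows → Spec_count_valid_rows rows (count_valid_rows rows)

-- ===== LEMMAS AND PROOFS =====

-- A's stateful direction flag versus B's per-direction pair scans
lemma validAux_eq : ∀ (rest : List Int) (prev : Int),
    validAux prev rest none = ((firstBad (prev :: rest) 1).isNone || (firstBad (prev :: rest) (-1)).isNone)
    ∧ validAux prev rest (some true) = (firstBad (prev :: rest) 1).isNone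
    ∧ validAux prev rest (some false) = (firstBad (prev :: rest) (-1)).isNone := by
  intro rest
  induction rest with
  | nil => intro prev; simp [validAux, firstBad]
  | cons x xs ih =>
    intro prev
    obtain ⟨ih1, ih2, ih3⟩ := ih x
    by_cases hgt : prev < x
    · have habs : |x - prev| = x - prev := abs_of_pos (by omega)
      by_cases hle : x - prev ≤ 3
      · have h1 : goodB prev x 1 = true := by simp [goodB]; omega
        have h2 : goodB prev x (-1) = false := by simp [goodB]; omega
        have hcond : ¬(x - prev < 1 ∨ x - prev > 3) := by omega
        simp [validAux, firstBad, h1, h2, habs, hcond, hgt, ih2]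
      · have h1 : goodB prev x 1 = false := by simp [goodB]; omega
        have h2 : goodB prev x (-1) = false := by simp [goodB]; omega
        have hcond : (x - prev < 1 ∨ x - prev > 3) := by omega
        simp [validAux, firstBad, h1, h2, habs, hcond]
    · by_cases hlt : x < prev
      · have habs : |x - prev| = -(x - prev) := abs_of_neg (by omega)
        by_cases hle : prev - x ≤ 3
        · have h1 : goodB prev x 1 = false := by simp [goodB]; omega
          have h2 : goodB prev x (-1) = true := by simp [goodB]; omega
          simp [validAux, firstBad, h1, h2, habs, hgt, hlt, ih3]
          intro _; omega
        · have h1 : goodB prev x 1 = false := by simp [goodB]; omega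
          have h2 : goodB prev x (-1) = false := by simp [goodB]; omega
          simp [validAux, firstBad, h1, h2, habs]
          refine ⟨?_, ?_, ?_⟩ <;> (intros; exfalso; omega)
      · have hxp : x = prev := by omega
        subst hxp
        have h1 : goodB x x 1 = false := by simp [goodB]
        have h2 : goodB x x (-1) = false := by simp [goodB]
        simp [validAux, firstBad, h1, h2]

lemma is_valid_eq (row : List Int) :
    is_valid_row row = ((firstBad row 1).isNone || (firstBad row (-1)).isNone) := by
  cases row with
  | nil => simp [is_valid_row, firstBad]
  | cons x xs => exact (validAux_eq xs x).1

lemma fb_tail (a : Int) (ys : List Int) (s : Int)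
    (h : (firstBad (a :: ys) s).isNone = true) : (firstBad ys s).isNone = true := by
  cases ys with
  | nil => simp [firstBad]
  | cons b t =>
    by_cases hg : goodB a b s = true
    · simpa [firstBad, hg] using h
    · simp [firstBad, hg] at h

lemma fb_lt (s : Int) : ∀ (xs : List Int) (p : Nat), firstBad xs s = some p → p + 1 < xs.length := by
  intro xs
  induction xs with
  | nil => intro p h; simp [firstBad] at h
  | cons a ys ih =>
    cases ys with
    | nil => intro p h; simp [firstBad] at h
    | cons b t =>
      intro p h
      by_cases hg : goodB a b s = true
      · rcases hfb : firstBad (b :: t) s with _ | q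
        · simp [firstBad, hg, hfb] at h
        · simp [firstBad, hg, hfb] at h
          have := ih q hfb
          simp at this ⊢
          omega
      · simp [firstBad, hg] at h
        simp [← h]

lemma dropB_zero (x : Int) (l : List Int) : dropB (x :: l) 0 = l := by
  simp [dropB]

lemma dropB_succ (x : Int) (l : List Int) (k : Nat) : dropB (x :: l) (k + 1) = x :: dropB l k := by
  simp [dropB]

-- only removing an endpoint of the first bad pair can repair a row
lemma fb_unique (s : Int) : ∀ (xs : List Int) (p : Nat), firstBad xs s = some p →
    ∀ j, j < xs.length → (firstBad (dropB xs j) s).isNone = true → j = p ∨ j = p + 1 := by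
  intro xs
  induction xs with
  | nil => intro p h; simp [firstBad] at h
  | cons a ys ih =>
    cases ys with
    | nil => intro p h; simp [firstBad] at h
    | cons b t =>
      intro p hp j hj hch
      by_cases hg : goodB a b s = true
      · rcases hfb : firstBad (b :: t) s with _ | q
        · simp [firstBad, hg, hfb] at hp
        · simp [firstBad, hg, hfb] at hp
          cases j with
          | zero => rw [dropB_zero] at hch; simp [hfb] at hch
          | succ k =>
            rw [dropB_succ] at hch
            have hch' := fb_tail a _ s hch
            have hk : k < (b :: t).length := by simpa using Nat.lt_of_succ_lt_succ hj
            rcases ih q hfb k hk hch' with h1 | h1 <;> omega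
      · have hp0 : p = 0 := by simp [firstBad, hg] at hp; omega
        cases j with
        | zero => omega
        | succ k =>
          cases k with
          | zero => omega
          | succ m =>
            rw [dropB_succ, dropB_succ] at hch
            simp [firstBad, hg] at hch

lemma okDir_eq (row : List Int) (s : Int) :
    okDir row s = ((firstBad row s).isNone ||
      (List.range row.length).any (fun i => (firstBad (dropB row i) s).isNone)) := by
  rcases h : firstBad row s with _ | p
  · simp [okDir, h]
  · rw [Bool.eq_iff_iff]
    simp only [okDir, h, List.any_eq_true, List.mem_range, Option.isNone_some,
      Bool.false_or, Bool.or_eq_true]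
    constructor
    · rintro (h1 | h1)
      · exact ⟨p, by have := fb_lt s row p h; omega, h1⟩
      · exact ⟨p + 1, fb_lt s row p h, h1⟩
    · rintro ⟨i, hi, hch⟩
      rcases fb_unique s row p h i hi hch with rfl | rfl
      · exact Or.inl hch
      · exact Or.inr hch

lemma row_ok (row : List Int) :
    (is_valid_row row || can_be_fixed_by_removal row) = (okDir row 1 || okDir row (-1)) := by
  rw [okDir_eq row 1, okDir_eq row (-1), is_valid_eq]
  unfold can_be_fixed_by_removal
  simp only [is_valid_eq]
  have hdrop : ∀ i, row.take i ++ row.drop (i + 1) = dropB row i := fun _ => rfl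
  simp only [hdrop]
  rw [Bool.eq_iff_iff]
  simp only [Bool.or_eq_true, List.any_eq_true, List.mem_range]
  constructor
  · rintro ((h | h) | ⟨i, hi, (h | h)⟩)
    · exact Or.inl (Or.inl h)
    · exact Or.inr (Or.inl h)
    · exact Or.inl (Or.inr ⟨i, hi, h⟩)
    · exact Or.inr (Or.inr ⟨i, hi, h⟩)
  · rintro ((h | ⟨i, hi, h⟩) | (h | ⟨i, hi, h⟩))
    · exact Or.inl (Or.inl h)
    · exact Or.inr ⟨i, hi, Or.inl h⟩
    · exact Or.inl (Or.inr h)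
    · exact Or.inr ⟨i, hi, Or.inr h⟩

lemma fold_count : ∀ (rows : List (List Int)) (acc : Int),
    rows.foldl (fun count row =>
      if is_valid_row row then count + 1
      else if can_be_fixed_by_removal row then count + 1
      else count) acc = acc + (rows.countP (fun row => okDir row 1 || okDir row (-1)) : Int) := by
  intro rows
  induction rows with
  | nil => intro acc; simp
  | cons r rs ih =>
    intro acc
    rw [List.foldl_cons, ih]
    have hf : (if is_valid_row r then acc + 1 else if can_be_fixed_by_removal r then acc + 1 else acc)
        = acc + (if (okDir r 1 || okDir r (-1)) then 1 else 0) := by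
      rw [← row_ok]
      by_cases h1 : is_valid_row r = true <;> by_cases h2 : can_be_fixed_by_removal r = true <;>
        simp [h1, h2]
    rw [hf, List.countP_cons]
    split_ifs <;> push_cast <;> ring

-- ===== VERDICT (by name: the statement is the Claim_ definition above) =====
theorem count_valid_rows_spec : Claim_equal_count_valid_rows := by
  intro rows _
  unfold Spec_count_valid_rows count_valid_rows count_valid_rows_alt
  rw [fold_count]
  simp
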